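-- pv_equiv track=rewrite | github.com/SSAFY-9-S4-STUDY/SWEAB | day21/P_92344/P_92344_seoJam.py | solution
-- ===== SOURCE A (Python) =====
-- def solution(board, skill):
--     # [0] pre_sum 2차원 리스트 만들기
--     n = len(board)
--     m = len(board[0])
--     pre_sum = list([0]*(m+1) for _ in range(n+1))
--
--     # [1] 각 모서리 점 찍기
--     for type_, r1, c1, r2, c2, degree in skill:
--         sign = -1 if type_ == 1 else 1
--         pre_sum[r1][c1] += sign * degree
--         pre_sum[r1][c2+1] -= sign * degree
--         pre_sum[r2+1][c1] -= sign * degree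
--         pre_sum[r2+1][c2+1] += sign * degree
--
--     # [2] 가로 누적합
--     for i in range(n+1):
--         sum_ = 0
--         for j in range(m+1):
--             sum_ += pre_sum[i][j]
--             pre_sum[i][j] = sum_
--
--     # [3] 세로 누적합
--     for j in range(m+1):
--         sum_ = 0
--         for i in range(n+1):
--             sum_ += pre_sum[i][j]
--             pre_sum[i][j] = sum_
--
--     # [4] 건물 훑기
--     answer = 0
--     for i in range(n):
--         for j in range(m):
--             if pre_sum[i][j] + board[i][j] > 0:
--                 answer += 1
--
--     return answer
-- ===== SOURCE B (Python) =====
-- def solution(board, skill):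
--     n, m = len(board), len(board[0])
--     damage = [[0] * m for _ in range(n)]
--     for type_, r1, c1, r2, c2, degree in skill:
--         d = -degree if type_ == 1 else degree
--         for i in range(r1, r2 + 1):
--             for j in range(c1, c2 + 1):
--                 damage[i][j] += d
--     return sum(1 for i in range(n) for j in range(m)
--                if board[i][j] + damage[i][j] > 0)
-- ===== Notes on version B (the rewrite author's own statement) =====
-- stated objective: simpler
-- what changed: Replaces the (n+1)x(m+1) difference-array corner marks plus horizontal and vertical prefix-sum passes by a fresh n x m damage grid updated directly per rectangle, then one counting scan; board is never mutated. Pre_ restricts to the problem's natural domain (nonempty board whose rows have at least len(board[0]) cells; each skill row a 6-tuple with 0 <= r1 <= r2 < n and 0 <= c1 <= c2 < m): outside it A raises (short rows, out-of-range indices) or its value is an accident of Python negative-index wraparound or of inverted-rectangle difference marks.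
-- outside the precondition, e.g. on solution([[1]], [[1, -1, 0, 0, 0, 5]]): A returns 1, B returns 0; on solution([[-1, -1, -1], [3, 3, 3], [-1, -1, -1]], [[0, 2, 0, 0, 2, 5]]): A returns 0, B returns 3
import Mathlib
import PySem

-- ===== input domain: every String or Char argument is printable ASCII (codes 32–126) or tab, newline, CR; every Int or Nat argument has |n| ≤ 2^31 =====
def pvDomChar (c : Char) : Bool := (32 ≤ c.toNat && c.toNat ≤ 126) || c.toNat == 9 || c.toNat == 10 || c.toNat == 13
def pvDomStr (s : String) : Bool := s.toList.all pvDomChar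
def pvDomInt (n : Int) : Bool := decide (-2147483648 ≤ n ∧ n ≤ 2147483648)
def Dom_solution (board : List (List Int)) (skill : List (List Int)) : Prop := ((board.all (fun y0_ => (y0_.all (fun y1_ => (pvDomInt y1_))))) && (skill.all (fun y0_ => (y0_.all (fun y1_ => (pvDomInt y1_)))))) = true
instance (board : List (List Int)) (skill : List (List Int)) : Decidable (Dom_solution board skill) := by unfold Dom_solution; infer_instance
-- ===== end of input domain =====

-- B replaces A's difference-array corner marks + two prefix-sum passes by direct per-rectangle
-- damage updates on a fresh n×m grid (simpler; board is never mutated by either side).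

-- ===== PORT A =====
-- Python's  g[i][j]  on a 2-D list, with default (total via pyGetD; Pre_ keeps all used indices in range)
def cellG (g : List (List Int)) (i j : Int) : Int :=
  PySem.List.pyGetD (PySem.List.pyGetD g i []) j 0

-- Python's  g[i][j] = v  (total via pyGetD/pySetD; Pre_ keeps all used indices in range)
def setG (g : List (List Int)) (i j v : Int) : List (List Int) :=
  PySem.List.pySetD g i (PySem.List.pySetD (PySem.List.pyGetD g i []) j v)

-- Python's  g[i][j] += v
def bumpG (g : List (List Int)) (i j v : Int) : List (List Int) :=
  setG g i j (cellG g i j + v)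

-- [1] one skill row: the four corner marks of A's difference array
def markStep (g : List (List Int)) (s : List Int) : List (List Int) :=
  match s with
  | [type_, r1, c1, r2, c2, degree] =>
    let sign : Int := if type_ = 1 then -1 else 1
    let g := bumpG g r1 c1 (sign * degree)
    let g := bumpG g r1 (c2 + 1) (-(sign * degree))
    let g := bumpG g (r2 + 1) c1 (-(sign * degree))
    bumpG g (r2 + 1) (c2 + 1) (sign * degree)
  | _ => g     -- Python raises ValueError on a skill row that is not a 6-tuple; excluded by Pre_

def solution (board : List (List Int)) (skill : List (List Int)) : Int :=
  let n : Int := PySem.List.len board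
  let m : Int := PySem.List.len (PySem.List.pyGetD board 0 [])
  -- [0] pre_sum
  let g0 : List (List Int) := List.replicate (n + 1).toNat (List.replicate (m + 1).toNat 0)
  -- [1] corner marks
  let g1 := skill.foldl markStep g0
  -- [2] horizontal accumulation
  let g2 := (PySem.List.pyRange 0 (n + 1) 1).foldl (fun g i =>
      ((PySem.List.pyRange 0 (m + 1) 1).foldl
        (fun (p : List (List Int) × Int) j =>
          let s := p.2 + cellG p.1 i j
          (setG p.1 i j s, s)) (g, 0)).1) g1
  -- [3] vertical accumulation
  let g3 := (PySem.List.pyRange 0 (m + 1) 1).foldl (fun g j =>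
      ((PySem.List.pyRange 0 (n + 1) 1).foldl
        (fun (p : List (List Int) × Int) i =>
          let s := p.2 + cellG p.1 i j
          (setG p.1 i j s, s)) (g, 0)).1) g2
  -- [4] count
  (PySem.List.pyRange 0 n 1).foldl (fun a i =>
    (PySem.List.pyRange 0 m 1).foldl (fun a j =>
      if cellG g3 i j + cellG board i j > 0 then a + 1 else a) a) 0

-- ===== PORT B =====
-- add d to every cell of the (inclusive) rectangle [r1,r2]×[c1,c2]
def rectAdd (g : List (List Int)) (r1 c1 r2 c2 d : Int) : List (List Int) :=
  (PySem.List.pyRange r1 (r2 + 1) 1).foldl (fun g i =>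
    (PySem.List.pyRange c1 (c2 + 1) 1).foldl (fun g j => bumpG g i j d) g) g

def dmgStep (g : List (List Int)) (s : List Int) : List (List Int) :=
  match s with
  | [type_, r1, c1, r2, c2, degree] =>
      rectAdd g r1 c1 r2 c2 (if type_ = 1 then -degree else degree)
  | _ => g     -- Python raises ValueError on a skill row that is not a 6-tuple; excluded by Pre_

def solution_alt (board : List (List Int)) (skill : List (List Int)) : Int :=
  let n : Int := PySem.List.len board
  let m : Int := PySem.List.len (PySem.List.pyGetD board 0 [])
  let dmg0 : List (List Int) := List.replicate n.toNat (List.replicate m.toNat 0)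
  let dmg := skill.foldl dmgStep dmg0
  (PySem.List.pyRange 0 n 1).foldl (fun a i =>
    (PySem.List.pyRange 0 m 1).foldl (fun a j =>
      if cellG board i j + cellG dmg i j > 0 then a + 1 else a) a) 0

-- ===== PRECONDITION & SPEC =====
-- a well-formed skill row for an N×M board: a 6-tuple [t,r1,c1,r2,c2,d] with 0 ≤ r1 ≤ r2 < N, 0 ≤ c1 ≤ c2 < M
def GoodS (s : List Int) (N M : Nat) : Prop :=
  s.length = 6 ∧ 0 ≤ s.getD 1 0 ∧ s.getD 1 0 ≤ s.getD 3 0 ∧ s.getD 3 0 < (N : Int)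
    ∧ 0 ≤ s.getD 2 0 ∧ s.getD 2 0 ≤ s.getD 4 0 ∧ s.getD 4 0 < (M : Int)

-- Pre_ is the problem's natural domain: a nonempty board whose rows have at least len(board[0]) cells
-- and well-formed in-range skill rectangles; outside it A raises (short rows, far out-of-range indices,
-- wrong row arity) or its value is an accident of Python negative-index wraparound / of difference
-- marks for an inverted rectangle (cites in claim.json).
def Pre_solution (board : List (List Int)) (skill : List (List Int)) : Prop :=
  board ≠ [] ∧ (∀ row ∈ board, (board.getD 0 []).length ≤ row.length) ∧
  ∀ s ∈ skill, GoodS s board.length (board.getD 0 []).length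

instance (board : List (List Int)) (skill : List (List Int)) : Decidable (Pre_solution board skill) := by
  unfold Pre_solution GoodS; infer_instance

def pvWitness_solution : List (List Int) × List (List Int) := ([[1, 2], [3, 4]], [[1, 0, 0, 1, 1, 2]])

def Spec_solution (board : List (List Int)) (skill : List (List Int)) (out : Int) : Prop := out = solution_alt board skill
instance (board : List (List Int)) (skill : List (List Int)) (out : Int) : Decidable (Spec_solution board skill out) := by unfold Spec_solution; infer_instance

-- ===== CLAIM (what is proved, stated in full; the proofs are below) =====
def Claim_equal_solution : Prop := ∀ (board : List (List Int)) (skill : List (List Int)), Dom_solution board skill → Pre_solution board skill → Spec_solution board skill (solution board skill)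

-- ===== LEMMAS AND PROOFS =====

def Shape (g : List (List Int)) (R C : Nat) : Prop :=
  g.length = R ∧ ∀ r ∈ g, r.length = C

def cellN (g : List (List Int)) (a b : Nat) : Int := (g.getD a []).getD b 0

def ind (c : Prop) [Decidable c] : Int := if c then 1 else 0

-- per-skill value added to cell (a,b) by A's corner marks
def markVal (s : List Int) (a b : Nat) : Int :=
  match s with
  | [t, r1, c1, r2, c2, d] =>
      (if t = 1 then -d else d) *
        ((ind ((a : Int) = r1) - ind ((a : Int) = r2 + 1)) *
         (ind ((b : Int) = c1) - ind ((b : Int) = c2 + 1)))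
  | _ => 0

-- per-skill damage of cell (a,b) in B
def dmgVal (s : List Int) (a b : Nat) : Int :=
  match s with
  | [t, r1, c1, r2, c2, d] =>
      (if t = 1 then -d else d) *
        (ind (r1 ≤ (a : Int) ∧ (a : Int) ≤ r2) * ind (c1 ≤ (b : Int) ∧ (b : Int) ≤ c2))
  | _ => 0

theorem cellG_natCast (g : List (List Int)) (a b : Nat) : cellG g (a : Int) (b : Int) = cellN g a b := by
  simp [cellG, cellN, PySem.List.pyGetD_natCast]

theorem setG_natCast (g : List (List Int)) (a b : Nat) (v : Int) :
    setG g (a : Int) (b : Int) v = g.set a ((g.getD a []).set b v) := by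
  simp [setG, PySem.List.pySetD_natCast, PySem.List.pyGetD_natCast]

theorem rowlen {g : List (List Int)} {R C : Nat} (h : Shape g R C) {a : Nat} (ha : a < R) :
    (g.getD a []).length = C := by
  obtain ⟨hl, hr⟩ := h
  have hal : a < g.length := by omega
  rw [List.getD_eq_getElem g [] hal]
  exact hr _ (List.getElem_mem hal)

theorem Shape_setG {g : List (List Int)} {R C : Nat} (h : Shape g R C) (a b : Nat) (v : Int)
    (ha : a < R) : Shape (setG g (a : Int) (b : Int) v) R C := by
  have hlen := rowlen h ha
  obtain ⟨hl, hr⟩ := h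
  rw [setG_natCast]
  refine ⟨by simp [hl], ?_⟩
  intro r hrm
  rcases List.mem_or_eq_of_mem_set hrm with h' | rfl
  · exact hr r h'
  · simpa using hlen

theorem cellN_setG {g : List (List Int)} {R C : Nat} (h : Shape g R C) {i j : Nat}
    (hi : i < R) (hj : j < C) (v : Int) (a b : Nat) :
    cellN (setG g (i : Int) (j : Int) v) a b = if a = i ∧ b = j then v else cellN g a b := by
  have hrl := rowlen h hi
  obtain ⟨hl, hr⟩ := h
  have hil : i < g.length := by omega
  rw [setG_natCast]
  unfold cellN
  by_cases hai : a = i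
  · subst hai
    have h1 : (g.set a ((g.getD a []).set j v)).getD a [] = (g.getD a []).set j v := by
      rw [List.getD_eq_getElem?_getD, List.getElem?_set]
      simp [hil]
    rw [h1]
    by_cases hbj : b = j
    · subst hbj
      rw [List.getD_eq_getElem?_getD, List.getElem?_set]
      have hb' : b < (g[a]?.getD []).length := by rw [← List.getD_eq_getElem?_getD]; omega
      simp [hb']
    · simp only [hbj, and_false, if_false]
      rw [List.getD_eq_getElem?_getD, List.getD_eq_getElem?_getD, List.getElem?_set]
      simp [Ne.symm hbj]
  · simp only [hai, false_and, if_false]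
    have h2 : (g.set i ((g.getD i []).set j v)).getD a [] = g.getD a [] := by
      rw [List.getD_eq_getElem?_getD, List.getD_eq_getElem?_getD, List.getElem?_set]
      simp [Ne.symm hai]
    rw [h2]

theorem cellN_bumpG {g : List (List Int)} {R C : Nat} (h : Shape g R C) {i j : Nat}
    (hi : i < R) (hj : j < C) (v : Int) (a b : Nat) :
    cellN (bumpG g (i : Int) (j : Int) v) a b = cellN g a b + (if a = i ∧ b = j then v else 0) := by
  unfold bumpG
  rw [cellN_setG h hi hj _ a b, cellG_natCast]
  split_ifs with hc
  · obtain ⟨rfl, rfl⟩ := hc; ring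
  · ring

theorem Shape_bumpG {g : List (List Int)} {R C : Nat} (h : Shape g R C) (a b : Nat) (v : Int)
    (ha : a < R) : Shape (bumpG g (a : Int) (b : Int) v) R C :=
  Shape_setG h a b _ ha

theorem cellN_oob {g : List (List Int)} {R C : Nat} (h : Shape g R C) {a b : Nat}
    (hab : R ≤ a ∨ C ≤ b) : cellN g a b = 0 := by
  unfold cellN
  have hl := h.1
  rcases hab with ha | hb
  · rw [List.getD_eq_default g [] (by omega)]
    simp
  · by_cases ha : a < R
    · have hC := rowlen h ha
      rw [List.getD_eq_default _ 0 (by omega)]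
    · have hl := h.1
      rw [List.getD_eq_default g [] (by omega)]
      simp

theorem Shape_zeros (R C : Nat) : Shape (List.replicate R (List.replicate C (0 : Int))) R C := by
  constructor
  · simp
  · intro r hrm
    rw [List.eq_of_mem_replicate hrm]
    simp

theorem cellN_zeros (R C a b : Nat) : cellN (List.replicate R (List.replicate C 0)) a b = 0 := by
  by_cases ha : a < R
  · unfold cellN
    rw [List.getD_eq_getElem (List.replicate R (List.replicate C (0:Int))) [] (by simpa using ha),
      List.getElem_replicate]
    rcases Nat.lt_or_ge b C with hb | hb
    · rw [List.getD_eq_getElem _ _ (by simpa using hb), List.getElem_replicate]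
    · rw [List.getD_eq_default _ _ (by simpa using hb)]
  · exact cellN_oob (Shape_zeros R C) (Or.inl (by omega))

-- destructuring a good skill row
theorem GoodS_elim {s : List Int} {N M : Nat} (h : GoodS s N M) :
    ∃ t r1 c1 r2 c2 d : Int, s = [t, r1, c1, r2, c2, d] ∧
      0 ≤ r1 ∧ r1 ≤ r2 ∧ r2 < (N : Int) ∧ 0 ≤ c1 ∧ c1 ≤ c2 ∧ c2 < (M : Int) := by
  obtain ⟨hlen, h1, h2, h3, h4, h5, h6⟩ := h
  match s, hlen with
  | [t, r1, c1, r2, c2, d], _ =>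
    exact ⟨t, r1, c1, r2, c2, d, rfl, by simpa using h1, by simpa using h2, by simpa using h3,
      by simpa using h4, by simpa using h5, by simpa using h6⟩

-- ----- A, phase [1]: corner marks -----
theorem markStep_cell {g : List (List Int)} {N M : Nat} (hg : Shape g (N + 1) (M + 1))
    {s : List Int} (hs : GoodS s N M) :
    Shape (markStep g s) (N + 1) (M + 1) ∧
      ∀ a b, cellN (markStep g s) a b = cellN g a b + markVal s a b := by
  obtain ⟨t, r1, c1, r2, c2, d, rfl, h1, h2, h3, h4, h5, h6⟩ := GoodS_elim hs
  obtain ⟨R1, rfl⟩ : ∃ k : Nat, r1 = (k : Int) := ⟨r1.toNat, (Int.toNat_of_nonneg h1).symm⟩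
  obtain ⟨C1, rfl⟩ : ∃ k : Nat, c1 = (k : Int) := ⟨c1.toNat, (Int.toNat_of_nonneg h4).symm⟩
  obtain ⟨R2, rfl⟩ : ∃ k : Nat, r2 = (k : Int) := ⟨r2.toNat, (Int.toNat_of_nonneg (le_trans h1 h2)).symm⟩
  obtain ⟨C2, rfl⟩ : ∃ k : Nat, c2 = (k : Int) := ⟨c2.toNat, (Int.toNat_of_nonneg (le_trans h4 h5)).symm⟩
  have hR12 : R1 ≤ R2 := by exact_mod_cast h2
  have hC12 : C1 ≤ C2 := by exact_mod_cast h5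
  have hR2N : R2 < N := by exact_mod_cast h3
  have hC2M : C2 < M := by exact_mod_cast h6
  have er : ((R2 : Int) + 1) = ((R2 + 1 : Nat) : Int) := by push_cast; ring
  have ec : ((C2 : Int) + 1) = ((C2 + 1 : Nat) : Int) := by push_cast; ring
  simp only [markStep, er, ec]
  set sd : Int := (if t = 1 then -1 else 1) * d with hsd
  have s1 := Shape_bumpG hg R1 C1 sd (by omega)
  have s2 := Shape_bumpG s1 R1 (C2 + 1) (-sd) (by omega)
  have s3 := Shape_bumpG s2 (R2 + 1) C1 (-sd) (by omega)
  have s4 := Shape_bumpG s3 (R2 + 1) (C2 + 1) sd (by omega)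
  refine ⟨s4, ?_⟩
  intro a b
  rw [cellN_bumpG s3 (by omega) (by omega) sd a b,
      cellN_bumpG s2 (by omega) (by omega) (-sd) a b,
      cellN_bumpG s1 (by omega) (by omega) (-sd) a b,
      cellN_bumpG hg (by omega) (by omega) sd a b]
  have e1 : ((a : Int) = (R1 : Int)) ↔ a = R1 := by omega
  have e2 : ((a : Int) = (R2 : Int) + 1) ↔ a = R2 + 1 := by omega
  have e3 : ((b : Int) = (C1 : Int)) ↔ b = C1 := by omega
  have e4 : ((b : Int) = (C2 : Int) + 1) ↔ b = C2 + 1 := by omega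
  have hmv : markVal [t, ↑R1, ↑C1, ↑R2, ↑C2, d] a b
      = sd * ((ind (a = R1) - ind (a = R2 + 1)) * (ind (b = C1) - ind (b = C2 + 1))) := by
    simp only [markVal, e1, e2, e3, e4, hsd]
    by_cases ht : t = 1 <;> simp [ht]
  rw [hmv]
  unfold ind
  split_ifs <;> first | ring1 | (exfalso; omega)

theorem marks_cell {N M : Nat} :
    ∀ (skill : List (List Int)) (g : List (List Int)),
      (∀ s ∈ skill, GoodS s N M) → Shape g (N + 1) (M + 1) →
      Shape (skill.foldl markStep g) (N + 1) (M + 1) ∧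
      ∀ a b, cellN (skill.foldl markStep g) a b
        = cellN g a b + (skill.map (fun s => markVal s a b)).sum := by
  intro skill
  induction skill with
  | nil => intro g _ hgs; exact ⟨hgs, by simp⟩
  | cons s ss ih =>
    intro g hs hgs
    have hstep := markStep_cell hgs (hs s (by simp))
    have ihh := ih _ (fun x hm => hs x (by simp [hm])) hstep.1
    refine ⟨ihh.1, ?_⟩
    intro a b
    simp only [List.foldl_cons, List.map_cons, List.sum_cons]
    rw [ihh.2 a b, hstep.2 a b]
    ring

-- ----- A, phases [2]/[3]: the in-place prefix-sum passes -----
def hstepF (i : Int) (p : List (List Int) × Int) (j : Nat) : List (List Int) × Int :=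
  (setG p.1 i (j : Int) (p.2 + cellG p.1 i (j : Int)), p.2 + cellG p.1 i (j : Int))

def vstepF (j : Int) (p : List (List Int) × Int) (i : Nat) : List (List Int) × Int :=
  (setG p.1 (i : Int) j (p.2 + cellG p.1 (i : Int) j), p.2 + cellG p.1 (i : Int) j)

def rowF (M : Nat) (g : List (List Int)) (i : Int) : List (List Int) :=
  ((List.range (M + 1)).foldl (hstepF i) (g, 0)).1

def colF (N : Nat) (g : List (List Int)) (j : Int) : List (List Int) :=
  ((List.range (N + 1)).foldl (vstepF j) (g, 0)).1

theorem hrow_inv {g : List (List Int)} {N M : Nat} (hg : Shape g (N + 1) (M + 1))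
    {i : Nat} (hi : i < N + 1) :
    ∀ k, k ≤ M + 1 →
      Shape ((List.range k).foldl (hstepF (i : Int)) (g, 0)).1 (N + 1) (M + 1) ∧
      ((List.range k).foldl (hstepF (i : Int)) (g, 0)).2 = ∑ j ∈ Finset.range k, cellN g i j ∧
      ∀ a b, cellN ((List.range k).foldl (hstepF (i : Int)) (g, 0)).1 a b
        = if a = i ∧ b < k then ∑ j' ∈ Finset.range (b + 1), cellN g i j' else cellN g a b := by
  intro k
  induction k with
  | zero =>
    intro _
    refine ⟨by simpa using hg, by simp, ?_⟩
    intro a b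
    simp
  | succ k ih =>
    intro hk
    obtain ⟨ihS, ihs, ihc⟩ := ih (by omega)
    have hkM : k < M + 1 := by omega
    simp only [List.range_succ, List.foldl_append, List.foldl_cons, List.foldl_nil]
    set P := (List.range k).foldl (hstepF (i : Int)) (g, 0) with hP
    have hcell : cellG P.1 (i : Int) (k : Int) = cellN g i k := by
      rw [cellG_natCast, ihc i k]
      simp
    have hs' : P.2 + cellG P.1 (i : Int) (k : Int) = ∑ j ∈ Finset.range (k + 1), cellN g i j := by
      rw [hcell, ihs, Finset.sum_range_succ]
    refine ⟨?_, ?_, ?_⟩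
    · exact Shape_setG ihS i k _ hi
    · exact hs'
    · intro a b
      show cellN (setG P.1 (i : Int) (k : Int) (P.2 + cellG P.1 (i : Int) (k : Int))) a b = _
      rw [cellN_setG ihS hi hkM _ a b, ihc a b]
      by_cases hai : a = i
      · subst hai
        by_cases hbk : b = k
        · subst hbk
          simp [hs']
        · by_cases hblt : b < k
          · simp [hbk, hblt, (show b < k + 1 by omega)]
          · have : ¬ b < k + 1 := by omega
            simp [hbk, hblt, this]
      · simp [hai]

theorem hpass_inv {N M : Nat} :
    ∀ k, k ≤ N + 1 → ∀ g, Shape g (N + 1) (M + 1) →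
      Shape ((List.range k).foldl (fun g (i : Nat) => rowF M g (i : Int)) g) (N + 1) (M + 1) ∧
      ∀ a b, cellN ((List.range k).foldl (fun g (i : Nat) => rowF M g (i : Int)) g) a b
        = if a < k ∧ b < M + 1 then ∑ j' ∈ Finset.range (b + 1), cellN g a j' else cellN g a b := by
  intro k
  induction k with
  | zero => intro _ g hg; exact ⟨hg, by intro a b; simp⟩
  | succ k ih =>
    intro hk g hg
    obtain ⟨ihS, ihc⟩ := ih (by omega) g hg
    simp only [List.range_succ, List.foldl_append, List.foldl_cons, List.foldl_nil]
    set G := (List.range k).foldl (fun g (i : Nat) => rowF M g (i : Int)) g with hG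
    obtain ⟨rS, _, rc⟩ := hrow_inv ihS (show k < N + 1 by omega) (M + 1) (le_refl _)
    refine ⟨rS, ?_⟩
    intro a b
    show cellN (rowF M G (k : Int)) a b = _
    unfold rowF
    rw [rc a b]
    by_cases hak : a = k
    · by_cases hbM : b < M + 1
      · rw [if_pos ⟨hak, hbM⟩, if_pos ⟨(show a < k + 1 by omega), hbM⟩, hak]
        exact Finset.sum_congr rfl fun j' _ => by rw [ihc k j']; simp
      · rw [if_neg (fun h => hbM h.2), ihc a b, if_neg (fun h => hbM h.2),
          if_neg (fun h => hbM h.2)]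
    · rw [if_neg (fun h => hak h.1), ihc a b]
      exact if_congr ⟨fun h => ⟨by omega, h.2⟩, fun h => ⟨by omega, h.2⟩⟩ rfl rfl

theorem vcol_inv {g : List (List Int)} {N M : Nat} (hg : Shape g (N + 1) (M + 1))
    {j : Nat} (hj : j < M + 1) :
    ∀ k, k ≤ N + 1 →
      Shape ((List.range k).foldl (vstepF (j : Int)) (g, 0)).1 (N + 1) (M + 1) ∧
      ((List.range k).foldl (vstepF (j : Int)) (g, 0)).2 = ∑ i ∈ Finset.range k, cellN g i j ∧
      ∀ a b, cellN ((List.range k).foldl (vstepF (j : Int)) (g, 0)).1 a b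
        = if b = j ∧ a < k then ∑ i' ∈ Finset.range (a + 1), cellN g i' j else cellN g a b := by
  intro k
  induction k with
  | zero =>
    intro _
    refine ⟨by simpa using hg, by simp, ?_⟩
    intro a b
    simp
  | succ k ih =>
    intro hk
    obtain ⟨ihS, ihs, ihc⟩ := ih (by omega)
    have hkN : k < N + 1 := by omega
    simp only [List.range_succ, List.foldl_append, List.foldl_cons, List.foldl_nil]
    set P := (List.range k).foldl (vstepF (j : Int)) (g, 0) with hP
    have hcell : cellG P.1 (k : Int) (j : Int) = cellN g k j := by
      rw [cellG_natCast, ihc k j]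
      simp
    have hs' : P.2 + cellG P.1 (k : Int) (j : Int) = ∑ i ∈ Finset.range (k + 1), cellN g i j := by
      rw [hcell, ihs, Finset.sum_range_succ]
    refine ⟨Shape_setG ihS k j _ hkN, hs', ?_⟩
    intro a b
    show cellN (setG P.1 (k : Int) (j : Int) (P.2 + cellG P.1 (k : Int) (j : Int))) a b = _
    rw [cellN_setG ihS hkN hj _ a b, ihc a b]
    by_cases hbj : b = j
    · subst hbj
      by_cases hak : a = k
      · subst hak
        simp [hs']
      · by_cases halt : a < k
        · simp [hak, halt, (show a < k + 1 by omega)]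
        · have : ¬ a < k + 1 := by omega
          simp [hak, halt, this]
    · simp [hbj]

theorem vpass_inv {N M : Nat} :
    ∀ k, k ≤ M + 1 → ∀ g, Shape g (N + 1) (M + 1) →
      Shape ((List.range k).foldl (fun g (j : Nat) => colF N g (j : Int)) g) (N + 1) (M + 1) ∧
      ∀ a b, cellN ((List.range k).foldl (fun g (j : Nat) => colF N g (j : Int)) g) a b
        = if b < k ∧ a < N + 1 then ∑ i' ∈ Finset.range (a + 1), cellN g i' b else cellN g a b := by
  intro k
  induction k with
  | zero => intro _ g hg; exact ⟨hg, by intro a b; simp⟩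
  | succ k ih =>
    intro hk g hg
    obtain ⟨ihS, ihc⟩ := ih (by omega) g hg
    simp only [List.range_succ, List.foldl_append, List.foldl_cons, List.foldl_nil]
    set G := (List.range k).foldl (fun g (j : Nat) => colF N g (j : Int)) g with hG
    obtain ⟨cS, _, cc⟩ := vcol_inv ihS (show k < M + 1 by omega) (N + 1) (le_refl _)
    refine ⟨cS, ?_⟩
    intro a b
    show cellN (colF N G (k : Int)) a b = _
    unfold colF
    rw [cc a b]
    by_cases hbk : b = k
    · by_cases haN : a < N + 1
      · rw [if_pos ⟨hbk, haN⟩, if_pos ⟨(show b < k + 1 by omega), haN⟩, hbk]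
        exact Finset.sum_congr rfl fun i' _ => by rw [ihc i' k]; simp
      · rw [if_neg (fun h => haN h.2), ihc a b, if_neg (fun h => haN h.2),
          if_neg (fun h => haN h.2)]
    · rw [if_neg (fun h => hbk h.1), ihc a b]
      exact if_congr ⟨fun h => ⟨by omega, h.2⟩, fun h => ⟨by omega, h.2⟩⟩ rfl rfl

-- ----- sums -----
theorem sum_ind_eq (i : Nat) (a : Int) :
    (∑ i' ∈ Finset.range (i + 1), ind ((i' : Int) = a)) = ind (0 ≤ a ∧ a ≤ (i : Int)) := by
  induction i with
  | zero =>
    rw [Finset.sum_range_one]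
    unfold ind
    split_ifs <;> omega
  | succ i ih =>
    rw [Finset.sum_range_succ, ih]
    unfold ind
    split_ifs <;> omega

theorem list_finset_swap {α : Type} (l : List α) (t : Finset Nat) (F : α → Nat → Int) :
    (∑ x ∈ t, (l.map (fun s => F s x)).sum) = (l.map (fun s => ∑ x ∈ t, F s x)).sum := by
  induction l with
  | nil => simp
  | cons s ss ih => simp [Finset.sum_add_distrib, ih]

theorem rect_sum {s : List Int} {N M : Nat} (hs : GoodS s N M) (i j : Nat) :
    (∑ i' ∈ Finset.range (i + 1), ∑ j' ∈ Finset.range (j + 1), markVal s i' j') = dmgVal s i j := by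
  obtain ⟨t, r1, c1, r2, c2, d, rfl, h1, h2, h3, h4, h5, h6⟩ := GoodS_elim hs
  set sd : Int := if t = 1 then -d else d with hsd
  have colS : (∑ j' ∈ Finset.range (j + 1),
      (ind ((j' : Int) = c1) - ind ((j' : Int) = c2 + 1))) = ind (c1 ≤ (j : Int) ∧ (j : Int) ≤ c2) := by
    rw [Finset.sum_sub_distrib, sum_ind_eq, sum_ind_eq]
    unfold ind
    split_ifs <;> omega
  have rowS : (∑ i' ∈ Finset.range (i + 1),
      (ind ((i' : Int) = r1) - ind ((i' : Int) = r2 + 1))) = ind (r1 ≤ (i : Int) ∧ (i : Int) ≤ r2) := by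
    rw [Finset.sum_sub_distrib, sum_ind_eq, sum_ind_eq]
    unfold ind
    split_ifs <;> omega
  have inner : ∀ i' : Nat, (∑ j' ∈ Finset.range (j + 1), markVal [t, r1, c1, r2, c2, d] i' j')
      = (sd * ind (c1 ≤ (j : Int) ∧ (j : Int) ≤ c2)) * (ind ((i' : Int) = r1) - ind ((i' : Int) = r2 + 1)) := by
    intro i'
    have : ∀ j' ∈ Finset.range (j + 1), markVal [t, r1, c1, r2, c2, d] i' j'
        = (sd * (ind ((i' : Int) = r1) - ind ((i' : Int) = r2 + 1)))
          * (ind ((j' : Int) = c1) - ind ((j' : Int) = c2 + 1)) := by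
      intro j' _
      simp only [markVal, hsd]
      by_cases ht : t = 1 <;> simp [ht] <;> ring
    rw [Finset.sum_congr rfl this, ← Finset.mul_sum, colS]
    ring
  rw [Finset.sum_congr rfl (fun i' _ => inner i'), ← Finset.mul_sum, rowS]
  simp only [dmgVal, hsd]
  by_cases ht : t = 1 <;> simp [ht] <;> ring

-- ----- B: direct rectangle updates -----
theorem rowAdd_cell {N M : Nat} {i d hi2 : Int} (h0 : 0 ≤ i) (hiN : i < (N : Int))
    (hhi : hi2 ≤ (M : Int)) :
    ∀ (fuel : Nat) (lo : Int), 0 ≤ lo → fuel = (hi2 - lo).toNat →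
      ∀ g, Shape g N M →
      Shape ((PySem.List.pyRange lo hi2 1).foldl (fun g j => bumpG g i j d) g) N M ∧
      ∀ a b, cellN ((PySem.List.pyRange lo hi2 1).foldl (fun g j => bumpG g i j d) g) a b
        = cellN g a b + (if (a : Int) = i ∧ lo ≤ (b : Int) ∧ (b : Int) < hi2 then d else 0) := by
  intro fuel
  induction fuel with
  | zero =>
    intro lo hlo hf g hg
    rw [PySem.List.pyRange_one_eq_nil (by omega)]
    refine ⟨hg, ?_⟩
    intro a b
    rw [if_neg (by omega)]
    simp
  | succ f ih =>
    intro lo hlo hf g hg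
    have hlt : lo < hi2 := by omega
    rw [PySem.List.pyRange_one_cons hlt]
    simp only [List.foldl_cons]
    obtain ⟨I, rfl⟩ : ∃ k : Nat, i = (k : Int) := ⟨i.toNat, (Int.toNat_of_nonneg h0).symm⟩
    obtain ⟨L, rfl⟩ : ∃ k : Nat, lo = (k : Int) := ⟨lo.toNat, (Int.toNat_of_nonneg hlo).symm⟩
    have hIN : I < N := by exact_mod_cast hiN
    have hLM : L < M := by omega
    have hbS := Shape_bumpG hg I L d hIN
    obtain ⟨S', law⟩ := ih ((L : Int) + 1) (by omega) (by omega) _ hbS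
    refine ⟨S', ?_⟩
    intro a b
    rw [law a b, cellN_bumpG hg hIN hLM d a b]
    have e1 : (a = I ∧ b = L) ↔ ((a : Int) = (I : Int) ∧ (b : Int) = (L : Int)) := by omega
    simp only [e1]
    split_ifs <;> first | ring1 | (exfalso; omega)

theorem rectAdd_cell {N M : Nat} {c1 c2 d : Int} (h4 : 0 ≤ c1) (h6 : c2 < (M : Int)) :
    ∀ (fuel : Nat) (r1 : Int), 0 ≤ r1 → ∀ (r2 : Int), r2 < (N : Int) → fuel = (r2 + 1 - r1).toNat →
      ∀ g, Shape g N M →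
      Shape (rectAdd g r1 c1 r2 c2 d) N M ∧
      ∀ a b, cellN (rectAdd g r1 c1 r2 c2 d) a b
        = cellN g a b
          + (if (r1 ≤ (a : Int) ∧ (a : Int) ≤ r2) ∧ c1 ≤ (b : Int) ∧ (b : Int) ≤ c2 then d else 0) := by
  intro fuel
  induction fuel with
  | zero =>
    intro r1 hr1 r2 hr2 hf g hg
    unfold rectAdd
    rw [PySem.List.pyRange_one_eq_nil (a := r1) (b := r2 + 1) (by omega)]
    refine ⟨hg, ?_⟩
    intro a b
    rw [if_neg (by omega)]
    simp
  | succ f ih =>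
    intro r1 hr1 r2 hr2 hf g hg
    have hlt : r1 < r2 + 1 := by omega
    unfold rectAdd
    rw [PySem.List.pyRange_one_cons (a := r1) (b := r2 + 1) hlt]
    simp only [List.foldl_cons]
    obtain ⟨S1, law1⟩ := rowAdd_cell (i := r1) (d := d) (hi2 := c2 + 1) hr1 (by omega) (by omega)
      ((c2 + 1 - c1).toNat) c1 h4 rfl g hg
    have ih' := ih (r1 + 1) (by omega) r2 hr2 (by omega) _ S1
    unfold rectAdd at ih'
    obtain ⟨S2, law2⟩ := ih'
    refine ⟨S2, ?_⟩
    intro a b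
    rw [law2 a b, law1 a b]
    split_ifs <;> first | ring1 | (exfalso; omega)

theorem dmgStep_cell {g : List (List Int)} {N M : Nat} (hg : Shape g N M)
    {s : List Int} (hs : GoodS s N M) :
    Shape (dmgStep g s) N M ∧ ∀ a b, cellN (dmgStep g s) a b = cellN g a b + dmgVal s a b := by
  obtain ⟨t, r1, c1, r2, c2, d, rfl, h1, h2, h3, h4, h5, h6⟩ := GoodS_elim hs
  simp only [dmgStep]
  obtain ⟨S, law⟩ := rectAdd_cell h4 h6 ((r2 + 1 - r1).toNat) r1 h1 r2 h3 rfl g hg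
  refine ⟨S, ?_⟩
  intro a b
  rw [law a b]
  congr 1
  simp only [dmgVal, ind]
  by_cases ht : t = 1 <;> simp only [ht, if_true, if_false] <;> split_ifs <;>
    first | ring1 | (exfalso; omega)

theorem dmgs_cell {N M : Nat} :
    ∀ (skill : List (List Int)) (g : List (List Int)),
      (∀ s ∈ skill, GoodS s N M) → Shape g N M →
      Shape (skill.foldl dmgStep g) N M ∧
      ∀ a b, cellN (skill.foldl dmgStep g) a b
        = cellN g a b + (skill.map (fun s => dmgVal s a b)).sum := by
  intro skill
  induction skill with
  | nil => intro g _ hgs; exact ⟨hgs, by simp⟩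
  | cons s ss ih =>
    intro g hs hgs
    have hstep := dmgStep_cell hgs (hs s (by simp))
    have ihh := ih _ (fun x hm => hs x (by simp [hm])) hstep.1
    refine ⟨ihh.1, ?_⟩
    intro a b
    simp only [List.foldl_cons, List.map_cons, List.sum_cons]
    rw [ihh.2 a b, hstep.2 a b]
    ring

-- ===== VERDICT (by name: the statement is the Claim_ definition above) =====
theorem grids_agree (board skill : List (List Int)) (hsk : ∀ s ∈ skill, GoodS s board.length (board.getD 0 []).length) :
    ∀ a b : Nat, a < board.length → b < (board.getD 0 []).length →
      cellN ((List.range ((board.getD 0 []).length + 1)).foldl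
          (fun g (j : Nat) => colF board.length g (j : Int))
          ((List.range (board.length + 1)).foldl
            (fun g (i : Nat) => rowF (board.getD 0 []).length g (i : Int))
            (skill.foldl markStep
              (List.replicate (board.length + 1) (List.replicate ((board.getD 0 []).length + 1) 0))))) a b
      = cellN (skill.foldl dmgStep
          (List.replicate board.length (List.replicate (board.getD 0 []).length 0))) a b := by
  set N := board.length with hN
  set M := (board.getD 0 []).length with hM
  intro a b ha hb
  obtain ⟨mS, mc⟩ := marks_cell skill (List.replicate (N + 1) (List.replicate (M + 1) 0)) hsk
    (Shape_zeros (N + 1) (M + 1))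
  obtain ⟨hS, hc⟩ := hpass_inv (N := N) (M := M) (N + 1) (le_refl _) _ mS
  obtain ⟨vS, vc⟩ := vpass_inv (N := N) (M := M) (M + 1) (le_refl _) _ hS
  obtain ⟨dS, dc⟩ := dmgs_cell skill (List.replicate N (List.replicate M 0)) hsk (Shape_zeros N M)
  rw [vc a b, if_pos ⟨by omega, by omega⟩]
  have h1 : ∀ i' ∈ Finset.range (a + 1),
      cellN ((List.range (N + 1)).foldl (fun g (i : Nat) => rowF M g (i : Int))
        (skill.foldl markStep (List.replicate (N + 1) (List.replicate (M + 1) 0)))) i' b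
      = (skill.map (fun s => ∑ j' ∈ Finset.range (b + 1), markVal s i' j')).sum := by
    intro i' hi'
    have hi'' : i' < N + 1 := by
      have := Finset.mem_range.mp hi'
      omega
    rw [hc i' b, if_pos ⟨by omega, by omega⟩]
    rw [Finset.sum_congr rfl (fun j' _ => by rw [mc i' j', cellN_zeros, zero_add])]
    exact list_finset_swap skill _ _
  rw [Finset.sum_congr rfl h1, list_finset_swap skill _ _]
  rw [dc a b, cellN_zeros, zero_add]
  congr 1
  exact List.map_congr_left (fun s hm => rect_sum (hsk s hm) a b)

theorem solution_spec : Claim_equal_solution := by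
  unfold Claim_equal_solution
  intro board skill _ hpre
  obtain ⟨hne, hrows, hsk⟩ := hpre
  unfold Spec_solution solution solution_alt
  have eN : ((board.length : Int) + 1) = ((board.length + 1 : Nat) : Int) := by push_cast; ring
  have eM : (((board.getD 0 []).length : Int) + 1) = (((board.getD 0 []).length + 1 : Nat) : Int) := by
    push_cast; ring
  simp only [PySem.List.len_eq, PySem.List.pyGetD_zero, eN, eM, Int.toNat_natCast,
    PySem.List.pyRange_zero_natCast, List.foldl_map]
  refine PySem.List.foldl_congr_mem _ _ _ _ ?_
  intro acc x hx
  refine PySem.List.foldl_congr_mem _ _ _ _ ?_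
  intro acc2 y hy
  have hXN : x < board.length := List.mem_range.mp hx
  have hYM : y < (board.getD 0 []).length := List.mem_range.mp hy
  show (if cellG ((List.range ((board.getD 0 []).length + 1)).foldl
          (fun g (j : Nat) => colF board.length g (j : Int))
          ((List.range (board.length + 1)).foldl
            (fun g (i : Nat) => rowF (board.getD 0 []).length g (i : Int))
            (skill.foldl markStep
              (List.replicate (board.length + 1)
                (List.replicate ((board.getD 0 []).length + 1) 0))))) (x : Int) (y : Int)
        + cellG board (x : Int) (y : Int) > 0 then acc2 + 1 else acc2)
    = (if cellG board (x : Int) (y : Int)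
        + cellG (skill.foldl dmgStep
            (List.replicate board.length (List.replicate (board.getD 0 []).length 0)))
            (x : Int) (y : Int) > 0 then acc2 + 1 else acc2)
  rw [cellG_natCast, cellG_natCast, cellG_natCast, grids_agree board skill hsk x y hXN hYM,
    Int.add_comm]
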